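-- pv_equiv track=rewrite | github.com/JRL-CARI-CNR-UNIBS/l2p | l2p/utils/pddl_VAL.py | extract_errors_warnings
-- ===== SOURCE A (Python) =====
-- def extract_errors_warnings(text):
--     lines = text.split('\n')
--     relevant_lines = []
--     capture = False
--
--     for line in lines:
--         if "Error:" in line or "Warning:" in line:
--             capture = True
--         if capture:
--             relevant_lines.append(line)
--
--     return "\n".join(relevant_lines) if relevant_lines else None
-- ===== SOURCE B (Python) =====
-- def extract_errors_warnings(text):
--     result = None
--     suffix = None
--     for line in reversed(text.split('\n')):
--         suffix = line if suffix is None else line + "\n" + suffix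
--         if "Error:" in line or "Warning:" in line:
--             result = suffix
--     return result
-- ===== Notes on version B (the rewrite author's own statement) =====
-- stated objective: alternative
-- what changed: Replaces A's forward flag-and-accumulate loop (capture boolean + per-line appends + final join) by a single reversed pass that builds the joined suffix string back-to-front incrementally and overwrites the result at each matching line, so no flag, no list accumulation and no final join remain.
import Mathlib
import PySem

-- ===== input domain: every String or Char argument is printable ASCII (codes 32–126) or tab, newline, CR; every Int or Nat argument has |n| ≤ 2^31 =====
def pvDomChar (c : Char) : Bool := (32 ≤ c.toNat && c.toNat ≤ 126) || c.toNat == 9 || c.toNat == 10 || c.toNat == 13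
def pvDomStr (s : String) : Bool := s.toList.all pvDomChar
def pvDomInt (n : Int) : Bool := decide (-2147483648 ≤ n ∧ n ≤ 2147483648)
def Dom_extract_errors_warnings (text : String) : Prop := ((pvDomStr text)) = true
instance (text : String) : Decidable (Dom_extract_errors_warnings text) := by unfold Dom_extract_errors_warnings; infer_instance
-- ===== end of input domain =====

-- B replaces A's forward flag-and-accumulate loop by a single reversed pass that builds the
-- joined suffix back-to-front and overwrites the result at each matching line (same cost).

-- ===== PORT A =====
-- A-side helper: the body of A's for-loop on the state (capture, relevant_lines)
def pvStepA (f : String → Bool) (st : Bool × List String) (line : String) : Bool × List String :=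
  let capture := if f line then true else st.1
  (capture, if capture then st.2 ++ [line] else st.2)

-- transliteration of A: split on '\n' (never raises: sep ≠ ""), capture loop, join-or-None
def extract_errors_warnings (text : String) : Option String :=
  let lines := (PySem.Str.split? text "\n").getD []
  let st := lines.foldl (pvStepA (fun line => PySem.Str.isIn "Error:" line || PySem.Str.isIn "Warning:" line)) (false, [])
  if st.2.isEmpty then none else some (PySem.Str.join "\n" st.2)

-- ===== PORT B =====
-- B-side helper: the body of B's for-loop on the state (suffix, result);
-- 'line + "\n" + suffix' is ported as the same concatenation, written with PySem.Str.join
def pvStepB (f : String → Bool) (st : Option String × Option String) (line : String) : Option String × Option String :=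
  let suffix := match st.1 with
    | none => line
    | some s => PySem.Str.join "\n" [line, s]
  (some suffix, if f line then some suffix else st.2)

-- transliteration of B: one pass over reversed(lines), building the joined suffix incrementally
def extract_errors_warnings_alt (text : String) : Option String :=
  let lines := (PySem.Str.split? text "\n").getD []
  (lines.reverse.foldl (pvStepB (fun line => PySem.Str.isIn "Error:" line || PySem.Str.isIn "Warning:" line)) (none, none)).2

-- ===== PRECONDITION & SPEC =====
def Spec_extract_errors_warnings (text : String) (out : Option String) : Prop := out = extract_errors_warnings_alt text
instance (text : String) (out : Option String) : Decidable (Spec_extract_errors_warnings text out) := by unfold Spec_extract_errors_warnings; infer_instance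

-- ===== CLAIM (what is proved, stated in full; the proofs are below) =====
def Claim_equal_extract_errors_warnings : Prop := ∀ (text : String), Dom_extract_errors_warnings text → Spec_extract_errors_warnings text (extract_errors_warnings text)

-- ===== LEMMAS AND PROOFS =====

-- join over a cons with a nonempty tail is one concatenation step
theorem pvJoinStep (l : String) (t : List String) (h : t ≠ []) :
    PySem.Str.join "\n" [l, PySem.Str.join "\n" t] = PySem.Str.join "\n" (l :: t) := by
  cases t with
  | nil => exact absurd rfl h
  | cons q rest =>
    simp [PySem.Str.join, PySem.Chars.join_cons_cons]

-- once capture is true, A's loop appends every remaining line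
theorem pvLoopTrue (f : String → Bool) (t : List String) (acc : List String) :
    t.foldl (pvStepA f) (true, acc) = (true, acc ++ t) := by
  induction t generalizing acc with
  | nil => simp
  | cons a t ih =>
    rw [List.foldl_cons]
    have hs : pvStepA f (true, acc) a = (true, acc ++ [a]) := by simp [pvStepA]
    rw [hs, ih]; simp

-- A's loop state from (false, []) is characterised by the index of the first matching line
theorem pvLoopChar (f : String → Bool) (ls : List String) :
    ls.foldl (pvStepA f) (false, [])
    = match ls.findIdx? f with
      | none => (false, ([] : List String))
      | some i => (true, ls.drop i) := by
  induction ls with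
  | nil => simp
  | cons a t ih =>
    rw [List.foldl_cons]
    by_cases h : f a
    · have hs : pvStepA f (false, []) a = (true, [a]) := by simp [pvStepA, h]
      rw [hs, pvLoopTrue]
      simp [List.findIdx?_cons, h]
    · have hs : pvStepA f (false, []) a = (false, []) := by simp [pvStepA, h]
      rw [hs, ih]
      cases hf : t.findIdx? f <;> simp [List.findIdx?_cons, h, hf]

-- B's reversed loop is characterised by (joined whole list, joined suffix from the first match)
theorem pvLoopBChar (f : String → Bool) (ls : List String) :
    ls.reverse.foldl (pvStepB f) (none, none)
    = ((match ls with
        | [] => none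
        | _ => some (PySem.Str.join "\n" ls)),
       (match ls.findIdx? f with
        | none => none
        | some i => some (PySem.Str.join "\n" (ls.drop i)))) := by
  rw [List.foldl_reverse]
  induction ls with
  | nil => simp
  | cons l t ih =>
    rw [List.foldr_cons, ih]
    cases t with
    | nil =>
      simp [pvStepB, PySem.Str.join, PySem.Chars.join_singleton]
      by_cases h : f l <;> simp [h, PySem.Chars.join_singleton]
    | cons q rest =>
      have hj : PySem.Str.join "\n" [l, PySem.Str.join "\n" (q :: rest)]
          = PySem.Str.join "\n" (l :: q :: rest) := pvJoinStep l (q :: rest) (by simp)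
      by_cases h : f l
      · simp [pvStepB, h, hj, List.findIdx?_cons]
      · cases hf : (q :: rest).findIdx? f with
        | none => simp [pvStepB, h, hj, List.findIdx?_cons, hf]
        | some i => simp [pvStepB, h, hj, List.findIdx?_cons, hf]

theorem extract_errors_warnings_eq (text : String) :
    extract_errors_warnings text = extract_errors_warnings_alt text := by
  unfold extract_errors_warnings extract_errors_warnings_alt
  simp only []
  rw [pvLoopChar, pvLoopBChar]
  cases hf : ((PySem.Str.split? text "\n").getD []).findIdx? (fun line => PySem.Str.isIn "Error:" line || PySem.Str.isIn "Warning:" line) with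
  | none => simp
  | some i =>
    rw [List.findIdx?_eq_some_iff_findIdx_eq] at hf
    have hne : (((PySem.Str.split? text "\n").getD []).drop i).isEmpty = false := by
      rw [List.isEmpty_eq_false_iff, ne_eq, List.drop_eq_nil_iff]; omega
    simp [hne]

-- ===== VERDICT (by name: the statement is the Claim_ definition above) =====
theorem extract_errors_warnings_spec : Claim_equal_extract_errors_warnings := by
  intro text _
  exact extract_errors_warnings_eq text
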